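-- pv_equiv track=rewrite | github.com/rainy-me/leetcode | medium/print-words-vertically/print-words-vertically.py | printVertically
-- ===== SOURCE A (Python) =====
-- from typing import List
--
-- def printVertically(s: str) -> List[str]:
--     ans = []
--     for i, w in enumerate(s.split()):
--         for j, char in enumerate(w):
--             if j >= len(ans):
--                 ans.append(" "*i + char)
--             else:
--                 ans[j] += " "*(i - len(ans[j])) + char
--     return ans
-- ===== SOURCE B (Python) =====
-- from typing import List
--
-- def printVertically(s: str) -> List[str]:
--     words = s.split()
--     if not words:
--         return []
--     maxlen = max(len(w) for w in words)
--     return ["".join(w[j] if j < len(w) else " " for w in words).rstrip()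
--             for j in range(maxlen)]
-- ===== Notes on version B (the rewrite author's own statement) =====
-- stated objective: idiomatic
-- what changed: Column-major traversal: precompute the maximum word length, then for each column index join one character (or space) per word and rstrip, instead of A's word-outer incremental row padding and in-place string growth.
import Mathlib
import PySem

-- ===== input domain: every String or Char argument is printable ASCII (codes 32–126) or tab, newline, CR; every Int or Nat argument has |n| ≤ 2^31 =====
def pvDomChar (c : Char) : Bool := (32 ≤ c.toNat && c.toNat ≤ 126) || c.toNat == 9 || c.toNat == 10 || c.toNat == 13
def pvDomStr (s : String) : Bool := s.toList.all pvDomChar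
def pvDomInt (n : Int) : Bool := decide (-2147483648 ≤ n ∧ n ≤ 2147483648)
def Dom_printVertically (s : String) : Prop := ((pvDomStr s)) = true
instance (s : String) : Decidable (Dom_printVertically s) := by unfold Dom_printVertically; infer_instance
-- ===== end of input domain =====

-- B is an idiomatic column-major rewrite (precomputed max word length, per-column join + rstrip)
-- of A's word-outer incremental row padding; same return value, same cost.

-- ===== PORT A =====
-- one inner-loop step of A: `if j >= len(ans): ans.append(" "*i + char) else: ans[j] += " "*(i-len(ans[j])) + char`
def pvStepA (i : Int) (ans : List (List Char)) (jc : Int × Char) : List (List Char) :=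
  if (ans.length : Int) ≤ jc.1 then
    ans ++ [List.replicate i.toNat ' ' ++ [jc.2]]
  else
    ans.set jc.1.toNat
      ((ans.getD jc.1.toNat []) ++
        List.replicate (i - ((ans.getD jc.1.toNat []).length : Int)).toNat ' ' ++ [jc.2])

-- A's two nested loops: `for i, w in enumerate(s.split()): for j, char in enumerate(w): …`
def pvOuterA (ws : List (List Char)) : List (List Char) :=
  (PySem.List.enumerate ws).foldl
    (fun ans iw => (PySem.List.enumerate iw.2).foldl (pvStepA iw.1) ans) []

def printVertically (s : String) : List String :=
  (pvOuterA (PySem.Chars.split₀ s.toList)).map String.ofList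

-- ===== PORT B =====
-- `"".join(w[j] if j < len(w) else " " for w in words)` — the j-th column of the words
def pvRow (ws : List (List Char)) (j : Nat) : List Char := ws.map (fun w => w.getD j ' ')

def printVertically_alt (s : String) : List String :=
  match PySem.Chars.split₀ s.toList with
  | [] => []
  | w :: t =>
    let maxlen := t.foldl (fun a v => max a v.length) w.length  -- max(len(w) for w in words)
    (List.range maxlen).map (fun j => String.ofList (PySem.Chars.rstrip (pvRow (w :: t) j)))

-- ===== PRECONDITION & SPEC =====
def Spec_printVertically (s : String) (out : List String) : Prop := out = printVertically_alt s
instance (s : String) (out : List String) : Decidable (Spec_printVertically s out) := by unfold Spec_printVertically; infer_instance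

-- ===== CLAIM (what is proved, stated in full; the proofs are below) =====
def Claim_equal_printVertically : Prop := ∀ (s : String), Dom_printVertically s → Spec_printVertically s (printVertically s)

-- ===== LEMMAS AND PROOFS =====

-- max word length
def pvL (ws : List (List Char)) : Nat := ws.foldl (fun a v => max a v.length) 0

-- pad a row to width n with trailing spaces
def pvPad (n : Nat) (r : List Char) : List Char := r ++ List.replicate (n - r.length) ' '

-- the claimed state of A's `ans` after processing the words ws
def pvG (ws : List (List Char)) : List (List Char) :=
  (List.range (pvL ws)).map (fun j => PySem.Chars.rstrip (pvRow ws j))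

-- the state of A's `ans` after the inner loop over word w at word index i, from state st
def pvF (i : Nat) (w : List Char) (st : List (List Char)) : List (List Char) :=
  (List.range (max st.length w.length)).map
    (fun j => if j < w.length then pvPad i (st.getD j []) ++ [w.getD j ' '] else st.getD j [])

theorem pv_range_map_getD (st : List (List Char)) :
    (List.range st.length).map (fun j => st.getD j []) = st := by
  apply List.ext_getElem
  · simp
  · intro i h1 h2
    simp [List.getD_eq_getElem?_getD, List.getElem?_eq_getElem h2]

theorem pvF_nil (i : Nat) (st : List (List Char)) : pvF i [] st = st := by
  have := pv_range_map_getD st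
  simp [pvF]
  simpa [List.getD_eq_getElem?_getD] using this

theorem pvStepA_last (i : Nat) (w : List Char) (c : Char) (st : List (List Char)) :
    pvStepA (i : Int) (pvF i w st) ((w.length : Int), c) = pvF i (w ++ [c]) st := by
  have hlF : (pvF i w st).length = max st.length w.length := by simp [pvF]
  by_cases hc : st.length ≤ w.length
  · have hmax : max st.length w.length = w.length := Nat.max_eq_right hc
    have hcond : ((pvF i w st).length : Int) ≤ (w.length : Int) := by
      rw [hlF, hmax]
    rw [pvStepA, if_pos hcond]
    have hgd : st.getD w.length [] = [] := List.getD_eq_default _ _ hc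
    simp only [pvF, List.length_append, List.length_singleton]
    have hm2 : max st.length (w.length + 1) = w.length + 1 := Nat.max_eq_right (by omega)
    rw [hmax, hm2, List.range_succ, List.map_append]
    congr 1
    · apply List.map_congr_left
      intro j hj
      have hj' : j < w.length := List.mem_range.mp hj
      rw [if_pos hj', if_pos (by omega : j < w.length + 1)]
      congr 2
      simp [List.getD_eq_getElem?_getD, List.getElem?_append_left hj']
    · simp only [List.map_cons, List.map_nil, if_pos (by omega : w.length < w.length + 1)]
      simp [pvPad, List.getD_eq_getElem?_getD, List.getElem?_eq_none hc]
  · replace hc := Nat.lt_of_not_le hc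
    have hmax : max st.length w.length = st.length := Nat.max_eq_left (le_of_lt hc)
    have hcond : ¬ ((pvF i w st).length : Int) ≤ (w.length : Int) := by
      rw [hlF, hmax]; exact_mod_cast Nat.not_le.mpr hc
    rw [pvStepA, if_neg hcond]
    have hgdF : (pvF i w st).getD w.length [] = st.getD w.length [] := by
      have hlt : w.length < (pvF i w st).length := by rw [hlF, hmax]; exact hc
      rw [List.getD_eq_getElem _ _ hlt]
      simp only [pvF, List.getElem_map, List.getElem_range, if_neg (lt_irrefl w.length)]
    have hm2 : max st.length (w.length + 1) = st.length := Nat.max_eq_left hc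
    simp only [Int.toNat_natCast, hgdF]
    apply List.ext_getElem
    · simp [pvF, hmax, hm2]
    · intro j hj1 hj2
      have hjst : j < st.length := by
        simpa [List.length_set, hlF, hmax] using hj1
      rw [List.getElem_set]
      simp only [pvF, List.getElem_map, List.getElem_range, List.length_append,
        List.length_singleton, hm2]
      by_cases hje : w.length = j
      · subst hje
        rw [if_pos rfl, if_pos (by omega : w.length < w.length + 1)]
        have hgdc : (w ++ [c]).getD w.length ' ' = c := by
          simp [List.getD_eq_getElem?_getD]
        rw [hgdc]
        simp only [pvPad]
        have h2 : ((i : Int) - ((st.getD w.length []).length : Int)).toNat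
            = i - (st.getD w.length []).length := by omega
        rw [h2, List.append_assoc]
      · rw [if_neg hje]
        rcases Nat.lt_or_ge j w.length with hjw | hjw
        · rw [if_pos hjw, if_pos (by omega : j < w.length + 1)]
          congr 2
          simp [List.getD_eq_getElem?_getD, List.getElem?_append_left hjw]
        · rw [if_neg (by omega), if_neg (by omega)]

theorem pv_inner (i : Nat) (w : List Char) (st : List (List Char)) :
    (PySem.List.enumerate w).foldl (pvStepA (i : Int)) st = pvF i w st := by
  induction w using List.reverseRecOn with
  | nil => simp [PySem.List.enumerate_nil, pvF_nil]
  | append_singleton w c ih =>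
    rw [PySem.List.enumerate_append, List.foldl_append, ih]
    simp only [PySem.List.enumerate_cons, PySem.List.enumerate_nil, List.foldl_cons, List.foldl_nil]
    have h : (0 : Int) + w.length = (w.length : Int) := by omega
    rw [h, pvStepA_last]

theorem pv_rstrip_append_nonspace (r : List Char) (c : Char) (h : PySem.Chars.isspace c = false) :
    PySem.Chars.rstrip (r ++ [c]) = r ++ [c] := by
  simp [PySem.Chars.rstrip, h]

theorem pv_rstrip_append_space (r : List Char) :
    PySem.Chars.rstrip (r ++ [' ']) = PySem.Chars.rstrip r := by
  have h : PySem.Chars.isspace ' ' = true := by decide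
  simp [PySem.Chars.rstrip, h]

theorem pv_rstrip_restore (r : List Char)
    (h : ∀ c ∈ r, PySem.Chars.isspace c = true → c = ' ') :
    PySem.Chars.rstrip r ++ List.replicate (r.length - (PySem.Chars.rstrip r).length) ' ' = r := by
  have hsplit := List.takeWhile_append_dropWhile (p := PySem.Chars.isspace) (l := r.reverse)
  have htk : r.reverse.takeWhile PySem.Chars.isspace
      = List.replicate ((r.reverse.takeWhile PySem.Chars.isspace).length) ' ' := by
    apply List.eq_replicate_of_mem
    intro c hc
    exact h c (by simpa using (List.takeWhile_prefix _).subset hc) (List.mem_takeWhile_imp hc)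
  have hleneq : (List.takeWhile PySem.Chars.isspace r.reverse).length
      + (List.dropWhile PySem.Chars.isspace r.reverse).length = r.length := by
    have := congrArg List.length hsplit
    simp only [List.length_append, List.length_reverse] at this; exact this
  conv_rhs => rw [← r.reverse_reverse, ← hsplit]
  rw [List.reverse_append, htk]
  simp only [PySem.Chars.rstrip, List.reverse_replicate, List.length_reverse]
  congr 2
  omega

theorem pv_len_le_L (ws : List (List Char)) : ∀ w ∈ ws, w.length ≤ pvL ws :=
  (PySem.List.le_foldl_max_nat ws List.length 0).2

theorem pvL_append (ws : List (List Char)) (w : List Char) :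
    pvL (ws ++ [w]) = max (pvL ws) w.length := by
  simp [pvL]

theorem pvG_length (ws : List (List Char)) : (pvG ws).length = pvL ws := by simp [pvG]

theorem pvG_getD (ws : List (List Char)) (j : Nat) :
    (pvG ws).getD j [] = if j < pvL ws then PySem.Chars.rstrip (pvRow ws j) else [] := by
  by_cases h : j < pvL ws
  · rw [if_pos h, List.getD_eq_getElem _ _ (by simpa [pvG] using h)]
    simp [pvG]
  · rw [if_neg h, List.getD_eq_default]
    simpa [pvG] using Nat.le_of_not_lt h

theorem pvG_getElem (ws : List (List Char)) (j : Nat) (h : j < (pvG ws).length) :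
    (pvG ws)[j] = PySem.Chars.rstrip (pvRow ws j) := by
  simp [pvG]

theorem pvRow_length (ws : List (List Char)) (j : Nat) : (pvRow ws j).length = ws.length := by
  simp [pvRow]

theorem pvRow_chars (ws : List (List Char)) (j : Nat)
    (h : ∀ w ∈ ws, ∀ c ∈ w, PySem.Chars.isspace c = false) :
    ∀ c ∈ pvRow ws j, PySem.Chars.isspace c = true → c = ' ' := by
  intro c hc hsp
  simp only [pvRow, List.mem_map] at hc
  obtain ⟨w, hw, rfl⟩ := hc
  rcases Nat.lt_or_ge j w.length with hj | hj
  · rw [List.getD_eq_getElem _ _ hj] at hsp ⊢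
    exact absurd (h w hw _ (List.getElem_mem hj)) (by simp [hsp])
  · rw [List.getD_eq_default _ _ hj]

theorem pvRow_big (ws : List (List Char)) (j : Nat) (h : pvL ws ≤ j) :
    pvRow ws j = List.replicate ws.length ' ' := by
  rw [← pvRow_length ws j]
  apply List.eq_replicate_of_mem
  intro c hc
  simp only [pvRow, List.mem_map] at hc
  obtain ⟨w, hw, rfl⟩ := hc
  exact List.getD_eq_default _ _ (le_trans (pv_len_le_L ws w hw) h)

theorem pv_pad_G (ws : List (List Char))
    (h : ∀ w ∈ ws, ∀ c ∈ w, PySem.Chars.isspace c = false) (j : Nat) :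
    pvPad ws.length ((pvG ws).getD j []) = pvRow ws j := by
  rw [pvG_getD]
  by_cases hj : j < pvL ws
  · rw [if_pos hj]
    have := pv_rstrip_restore (pvRow ws j) (pvRow_chars ws j h)
    rw [pvRow_length] at this
    simpa [pvPad] using this
  · rw [if_neg hj, pvRow_big ws j (Nat.le_of_not_lt hj)]
    simp [pvPad]

theorem pvF_G (ws : List (List Char)) (w : List Char)
    (hws : ∀ v ∈ ws, ∀ c ∈ v, PySem.Chars.isspace c = false)
    (hw : ∀ c ∈ w, PySem.Chars.isspace c = false) :
    pvF ws.length w (pvG ws) = pvG (ws ++ [w]) := by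
  apply List.ext_getElem
  · simp [pvF, pvG, pvL_append]
  · intro j hj1 hj2
    have hjm : j < max (pvL ws) w.length := by simpa [pvF, pvG_length] using hj1
    rw [pvG_getElem _ _ hj2]
    simp only [pvF, List.getElem_map, List.getElem_range]
    have hrow : pvRow (ws ++ [w]) j = pvRow ws j ++ [w.getD j ' '] := by simp [pvRow]
    rw [hrow]
    rcases Nat.lt_or_ge j w.length with hjw | hjw
    · rw [if_pos hjw]
      have hc : w.getD j ' ' = w[j] := List.getD_eq_getElem _ _ hjw
      rw [pv_pad_G ws hws j, hc,
        pv_rstrip_append_nonspace _ _ (hw _ (List.getElem_mem hjw))]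
    · rw [if_neg (Nat.not_lt.mpr hjw)]
      rw [List.getD_eq_default _ _ hjw, pv_rstrip_append_space, pvG_getD,
        if_pos (by omega : j < pvL ws)]

theorem pv_outer (ws : List (List Char))
    (h : ∀ w ∈ ws, ∀ c ∈ w, PySem.Chars.isspace c = false) :
    pvOuterA ws = pvG ws := by
  induction ws using List.reverseRecOn with
  | nil => rfl
  | append_singleton ws w ih =>
    have hws : ∀ v ∈ ws, ∀ c ∈ v, PySem.Chars.isspace c = false := by
      intro v hv; exact h v (by simp [hv])
    unfold pvOuterA
    rw [PySem.List.enumerate_append, List.foldl_append]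
    have hpre : (PySem.List.enumerate ws).foldl
        (fun ans iw => (PySem.List.enumerate iw.2).foldl (pvStepA iw.1) ans) [] = pvG ws := ih hws
    rw [hpre]
    simp only [PySem.List.enumerate_cons, PySem.List.enumerate_nil, List.foldl_cons, List.foldl_nil]
    have hz : (0 : Int) + ws.length = ((ws.length : Nat) : Int) := by omega
    rw [hz, pv_inner ws.length w (pvG ws), pvF_G ws w hws (h w (by simp))]

theorem pv_split₀_go_nonspace (s cur : List Char) (acc : List (List Char))
    (hcur : ∀ c ∈ cur, PySem.Chars.isspace c = false)
    (hacc : ∀ w ∈ acc, ∀ c ∈ w, PySem.Chars.isspace c = false) :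
    ∀ w ∈ PySem.Chars.split₀.go s cur acc, ∀ c ∈ w, PySem.Chars.isspace c = false := by
  induction s generalizing cur acc with
  | nil =>
    intro w hw
    rw [PySem.Chars.split₀.go] at hw
    split at hw
    · exact hacc w (by simpa using hw)
    · simp only [List.mem_reverse] at hw
      rcases List.mem_cons.mp hw with rfl | hm
      · intro c hc; exact hcur c (by simpa using hc)
      · exact hacc w hm
  | cons a s ih =>
    intro w hw
    rw [PySem.Chars.split₀.go] at hw
    by_cases hsp : PySem.Chars.isspace a = true
    · rw [if_pos hsp] at hw
      split at hw
      · exact ih [] acc (by simp) hacc w hw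
      · refine ih [] (cur.reverse :: acc) (by simp) ?_ w hw
        intro v hv
        rcases List.mem_cons.mp hv with rfl | hm
        · intro c hc; exact hcur c (by simpa using hc)
        · exact hacc v hm
    · rw [if_neg hsp] at hw
      refine ih (a :: cur) acc ?_ hacc w hw
      intro c hc
      rcases List.mem_cons.mp hc with rfl | hm
      · exact Bool.not_eq_true _ ▸ (by simpa using hsp)
      · exact hcur c hm

theorem pv_split₀_nonspace (cs : List Char) :
    ∀ w ∈ PySem.Chars.split₀ cs, ∀ c ∈ w, PySem.Chars.isspace c = false := by
  exact pv_split₀_go_nonspace cs [] [] (by simp) (by simp)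

-- ===== VERDICT (by name: the statement is the Claim_ definition above) =====
theorem printVertically_spec : Claim_equal_printVertically := by
  intro s _
  unfold Spec_printVertically printVertically printVertically_alt
  rw [pv_outer _ (pv_split₀_nonspace s.toList)]
  cases h : PySem.Chars.split₀ s.toList with
  | nil => rfl
  | cons w t =>
    simp only [pvG, pvL, List.map_map]
    congr 1
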